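-- pv_equiv track=rewrite | github.com/lokimian/Billa | Helpdesk.py | calculate_ticket_stats
-- ===== SOURCE A (Python) =====
-- def calculate_ticket_stats(ticket_list):
--     open_tickets = 0
--     closed_tickets = 0
--
--     for ticket in ticket_list:
--         if ticket["Status"] == 'Open':
--             open_tickets += 1
--         elif ticket["Status"] == "Closed":
--             closed_tickets += 1
--
--     return open_tickets, closed_tickets
-- ===== SOURCE B (Python) =====
-- def calculate_ticket_stats(ticket_list):
--     statuses = [t["Status"] for t in ticket_list]
--     return statuses.count('Open'), statuses.count('Closed')
-- ===== Notes on version B (the rewrite author's own statement) =====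
-- stated objective: simpler
-- what changed: Replaced the single-pass if/elif dual-accumulator loop with staged passes: build the status list once, then answer with two list.count scans (no accumulator state at all).
import Mathlib
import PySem

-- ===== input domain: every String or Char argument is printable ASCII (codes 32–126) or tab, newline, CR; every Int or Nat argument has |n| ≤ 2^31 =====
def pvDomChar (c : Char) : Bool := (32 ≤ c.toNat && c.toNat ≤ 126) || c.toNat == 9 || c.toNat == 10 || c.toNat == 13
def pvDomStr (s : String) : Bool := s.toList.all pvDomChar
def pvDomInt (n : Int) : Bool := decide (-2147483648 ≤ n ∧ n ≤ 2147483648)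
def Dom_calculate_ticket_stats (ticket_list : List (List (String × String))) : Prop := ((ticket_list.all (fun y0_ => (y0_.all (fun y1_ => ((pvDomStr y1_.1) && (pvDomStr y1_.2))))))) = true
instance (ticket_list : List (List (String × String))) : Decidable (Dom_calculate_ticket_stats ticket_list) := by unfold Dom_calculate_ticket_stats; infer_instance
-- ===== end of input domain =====

-- B is simpler: it extracts the status list once and counts 'Open' and 'Closed' with two list.count scans, instead of A's if/elif dual-accumulator loop.
-- ===== PORT A =====
-- ticket["Status"] raises KeyError when the key is absent; those inputs are excluded by Pre_, so the total getD is exact on Pre_.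
def calculate_ticket_stats (ticket_list : List (List (String × String))) : Int × Int :=
  ticket_list.foldl (fun (acc : Int × Int) ticket =>
    if (PySem.Dict.ofList ticket).getD "Status" "" = "Open" then (acc.1 + 1, acc.2)
    else if (PySem.Dict.ofList ticket).getD "Status" "" = "Closed" then (acc.1, acc.2 + 1)
    else acc) (0, 0)

-- ===== PORT B =====
def calculate_ticket_stats_alt (ticket_list : List (List (String × String))) : Int × Int :=
  let statuses := ticket_list.map (fun t => (PySem.Dict.ofList t).getD "Status" "")
  ((statuses.count "Open" : Int), (statuses.count "Closed" : Int))

-- ===== PRECONDITION & SPEC =====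
-- Pre_ excludes tickets without a "Status" key, on which Python A raises KeyError.
def Pre_calculate_ticket_stats (ticket_list : List (List (String × String))) : Prop :=
  (ticket_list.all (fun t => (PySem.Dict.ofList t).contains "Status")) = true
instance (ticket_list : List (List (String × String))) : Decidable (Pre_calculate_ticket_stats ticket_list) := by unfold Pre_calculate_ticket_stats; infer_instance
def pvWitness_calculate_ticket_stats : (List (List (String × String))) :=
  [[("Status", "Open")], [("Status", "Closed"), ("Id", "2")], [("Status", "Pending")]]
def Spec_calculate_ticket_stats (ticket_list : List (List (String × String))) (out : Int × Int) : Prop := out = calculate_ticket_stats_alt ticket_list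
instance (ticket_list : List (List (String × String))) (out : Int × Int) : Decidable (Spec_calculate_ticket_stats ticket_list out) := by unfold Spec_calculate_ticket_stats; infer_instance

-- ===== CLAIM (what is proved, stated in full; the proofs are below) =====
def Claim_equal_calculate_ticket_stats : Prop := ∀ (ticket_list : List (List (String × String))), Dom_calculate_ticket_stats ticket_list → Pre_calculate_ticket_stats ticket_list → Spec_calculate_ticket_stats ticket_list (calculate_ticket_stats ticket_list)

-- ===== LEMMAS AND PROOFS =====
-- A's loop, started from any accumulator, adds the Open/Closed counts of the statuses.
lemma fold_counts (l : List (List (String × String))) (o c : Int) :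
    l.foldl (fun (acc : Int × Int) ticket =>
      if (PySem.Dict.ofList ticket).getD "Status" "" = "Open" then (acc.1 + 1, acc.2)
      else if (PySem.Dict.ofList ticket).getD "Status" "" = "Closed" then (acc.1, acc.2 + 1)
      else acc) (o, c)
    = (o + ((l.map (fun t => (PySem.Dict.ofList t).getD "Status" "")).count "Open" : Int),
       c + ((l.map (fun t => (PySem.Dict.ofList t).getD "Status" "")).count "Closed" : Int)) := by
  induction l generalizing o c with
  | nil => simp
  | cons t ts ih =>
    simp only [List.foldl_cons, List.map_cons]
    split_ifs with h1 h2 <;> simp [*] <;> ring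

-- ===== VERDICT (by name: the statement is the Claim_ definition above) =====
theorem calculate_ticket_stats_spec : Claim_equal_calculate_ticket_stats := by
  intro tl _ _
  unfold Spec_calculate_ticket_stats calculate_ticket_stats calculate_ticket_stats_alt
  rw [fold_counts]
  simp
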